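-- pv_equiv track=rewrite | github.com/acikus/Kefalica | gameSort.py | no_legal_moves
-- ===== SOURCE A (Python) =====
-- def no_legal_moves(tubes, TUBE_CAPACITY):
--     for i, tube in enumerate(tubes):
--         if not tube:
--             continue
--         ball = tube[-1]
--         for j, other in enumerate(tubes):
--             if i == j:
--                 continue
--             if len(other) < TUBE_CAPACITY and (not other or other[-1] == ball):
--                 return False
--     return True
-- ===== SOURCE B (Python) =====
-- def no_legal_moves(tubes, TUBE_CAPACITY):
--     # One pass: count, per top color, how many tubes carry it (sources) and how
--     # many of those can still receive (non-full); note any empty receivable tube.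
--     any_nonempty = False
--     empty_receiver = False
--     sources = {}
--     receivers = {}
--     for tube in tubes:
--         if tube:
--             any_nonempty = True
--             color = tube[-1]
--             sources[color] = sources.get(color, 0) + 1
--             if len(tube) < TUBE_CAPACITY:
--                 receivers[color] = receivers.get(color, 0) + 1
--         elif 0 < TUBE_CAPACITY:
--             empty_receiver = True
--     if any_nonempty and empty_receiver:
--         return False
--     for color in receivers:
--         if sources[color] >= 2:
--             return False
--     return True
-- ===== Notes on version B (the rewrite author's own statement) =====
-- stated objective: alternative
-- what changed: Replaces A's all-pairs scan over tube pairs by a single counting pass (per-top-color source/receiver counts plus empty/nonempty flags) followed by one pass over the distinct top colors; O(n) worst case vs A's O(n^2) worst case, but A's early exit makes the measured times comparable on the generated inputs.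
import Mathlib
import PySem

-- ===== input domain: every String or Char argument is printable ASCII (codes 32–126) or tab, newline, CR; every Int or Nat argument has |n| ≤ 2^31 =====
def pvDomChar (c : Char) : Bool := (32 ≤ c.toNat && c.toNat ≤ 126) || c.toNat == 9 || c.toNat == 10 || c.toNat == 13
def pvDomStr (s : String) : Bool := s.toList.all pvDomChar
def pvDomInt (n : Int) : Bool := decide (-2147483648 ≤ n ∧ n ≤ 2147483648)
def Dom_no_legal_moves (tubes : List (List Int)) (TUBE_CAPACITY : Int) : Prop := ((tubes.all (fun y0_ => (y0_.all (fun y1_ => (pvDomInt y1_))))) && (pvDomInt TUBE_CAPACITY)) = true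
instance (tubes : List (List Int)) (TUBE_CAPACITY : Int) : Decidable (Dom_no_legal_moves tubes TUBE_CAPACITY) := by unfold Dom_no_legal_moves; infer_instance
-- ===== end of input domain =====

-- B replaces A's all-pairs scan by one counting pass over the tubes (per-top-color
-- source/receiver counts plus two flags) and a pass over the distinct top colors.

-- ===== PORT A =====
-- A: for each nonempty tube i, scan all tubes j ≠ i for a receiver (non-full and
-- empty or same top ball); return False on the first hit, True otherwise.
def no_legal_moves (tubes : List (List Int)) (TUBE_CAPACITY : Int) : Bool :=
  !((PySem.List.enumerate tubes).any (fun it =>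
      if it.2.isEmpty then false          -- 'if not tube: continue'
      else
        match PySem.List.pyGet? it.2 (-1) with   -- ball = tube[-1]
        | none => false                   -- unreachable: tube is nonempty here
        | some ball =>
          (PySem.List.enumerate tubes).any (fun jt =>
            if it.1 == jt.1 then false    -- 'if i == j: continue'
            else
              decide ((jt.2.length : Int) < TUBE_CAPACITY) &&
                (jt.2.isEmpty || (PySem.List.pyGet? jt.2 (-1) == some ball)))))

-- ===== PORT B =====
-- tube[-1] of a nonempty tube (both call sites are guarded by nonemptiness)
def pyTop (t : List Int) : Int := (PySem.List.pyGet? t (-1)).getD 0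

-- body of B's single counting loop; state = (any_nonempty, empty_receiver, sources, receivers)
def altStep (TUBE_CAPACITY : Int)
    (st : Bool × Bool × PySem.Dict Int Int × PySem.Dict Int Int) (tube : List Int) :
    Bool × Bool × PySem.Dict Int Int × PySem.Dict Int Int :=
  if !tube.isEmpty then
    let color := pyTop tube
    (true, st.2.1,
     st.2.2.1.insert color (st.2.2.1.getD color 0 + 1),
     if decide ((tube.length : Int) < TUBE_CAPACITY) then
       st.2.2.2.insert color (st.2.2.2.getD color 0 + 1)
     else st.2.2.2)
  else if 0 < TUBE_CAPACITY then (st.1, true, st.2.2.1, st.2.2.2)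
  else st

def no_legal_moves_alt (tubes : List (List Int)) (TUBE_CAPACITY : Int) : Bool :=
  let st := tubes.foldl (altStep TUBE_CAPACITY) (false, false, PySem.Dict.empty, PySem.Dict.empty)
  if st.1 && st.2.1 then false
  else if st.2.2.2.keys.any (fun color => decide (2 ≤ st.2.2.1.getD color 0)) then false
  else true

-- ===== PRECONDITION & SPEC =====
def Spec_no_legal_moves (tubes : List (List Int)) (TUBE_CAPACITY : Int) (out : Bool) : Prop := out = no_legal_moves_alt tubes TUBE_CAPACITY
instance (tubes : List (List Int)) (TUBE_CAPACITY : Int) (out : Bool) : Decidable (Spec_no_legal_moves tubes TUBE_CAPACITY out) := by unfold Spec_no_legal_moves; infer_instance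

-- ===== CLAIM (what is proved, stated in full; the proofs are below) =====
def Claim_equal_no_legal_moves : Prop := ∀ (tubes : List (List Int)) (TUBE_CAPACITY : Int), Dom_no_legal_moves tubes TUBE_CAPACITY → Spec_no_legal_moves tubes TUBE_CAPACITY (no_legal_moves tubes TUBE_CAPACITY)

-- ===== LEMMAS AND PROOFS =====

-- "a legal move exists": some nonempty tube i can pour onto some other tube j
def moveEx (tubes : List (List Int)) (cap : Int) : Prop :=
  ∃ (i j : Nat) (hi : i < tubes.length) (hj : j < tubes.length), i ≠ j ∧
    tubes[i] ≠ [] ∧ ((tubes[j].length : Int) < cap) ∧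
    (tubes[j] = [] ∨ tubes[j].getLast? = tubes[i].getLast?)

lemma pyGet_neg_one (l : List Int) : PySem.List.pyGet? l (-1) = l.getLast? := by
  simp [PySem.List.pyGet?, PySem.List.pyIdx?]
  rcases l with _ | ⟨a, t⟩
  · simp
  · simp [List.getLast?_eq_getElem?]

lemma getLast?_eq_some_pyTop (u : List Int) (h : u ≠ []) : u.getLast? = some (pyTop u) := by
  unfold pyTop
  rw [pyGet_neg_one]
  rcases Option.isSome_iff_exists.mp (List.getLast?_isSome.mpr h) with ⟨v, hv⟩
  simp [hv]

lemma pyTop_eq_of_getLast?_eq {u v : List Int} (hu : u ≠ []) (hv : v ≠ [])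
    (h : u.getLast? = v.getLast?) : pyTop u = pyTop v := by
  have := (getLast?_eq_some_pyTop u hu).symm.trans (h.trans (getLast?_eq_some_pyTop v hv))
  exact Option.some.inj this

lemma A_false_iff (tubes : List (List Int)) (cap : Int) :
    no_legal_moves tubes cap = false ↔ moveEx tubes cap := by
  unfold no_legal_moves moveEx
  simp only [Bool.not_eq_false', List.any_eq_true, PySem.List.mem_enumerate_iff]
  constructor
  · rintro ⟨p, ⟨k, hk, rfl⟩, hp⟩
    rcases htE : (tubes[k]).isEmpty with _ | _
    · rcases hball : PySem.List.pyGet? (tubes[k]) (-1) with _ | ball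
      · simp [htE, hball] at hp
      · simp only [htE, hball, if_false, Bool.false_eq_true, List.any_eq_true,
          PySem.List.mem_enumerate_iff] at hp
        rcases hp with ⟨q, ⟨m, hm, rfl⟩, hq⟩
        by_cases hkm : (k : Int) = (m : Int)
        · rw [if_pos (by simpa using hkm)] at hq; exact absurd hq (by simp)
        · rw [if_neg (by simpa using hkm)] at hq
          simp only [Bool.and_eq_true, decide_eq_true_eq, Bool.or_eq_true] at hq
          refine ⟨k, m, hk, hm, by exact_mod_cast hkm, by simpa using htE, hq.1, ?_⟩
          rcases hq.2 with hE | hB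
          · exact Or.inl (by simpa using hE)
          · refine Or.inr ?_
            rw [← pyGet_neg_one, ← pyGet_neg_one, hball]
            simpa using hB
    · simp [htE] at hp
  · rintro ⟨i, j, hi, hj, hij, hne, hlen, hdisj⟩
    refine ⟨((i : Int), tubes[i]), ⟨i, hi, by simp⟩, ?_⟩
    have htE : (tubes[i]).isEmpty = false := by simpa using hne
    obtain ⟨b, hb⟩ := Option.isSome_iff_exists.mp (List.getLast?_isSome.mpr hne)
    rw [htE]
    simp only [Bool.false_eq_true, if_false]
    rw [pyGet_neg_one, hb]
    simp only [List.any_eq_true, PySem.List.mem_enumerate_iff]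
    refine ⟨((j : Int), tubes[j]), ⟨j, hj, by simp⟩, ?_⟩
    rw [if_neg (by simpa using fun h => hij (by exact_mod_cast h))]
    simp only [Bool.and_eq_true, decide_eq_true_eq, Bool.or_eq_true]
    refine ⟨hlen, ?_⟩
    rcases hdisj with hE | hL
    · exact Or.inl (by simp [hE])
    · refine Or.inr ?_
      rw [pyGet_neg_one]
      simp [hL, hb]

lemma countP_two_aux {l : List (List Int)} {p : List Int → Bool} {i j : Nat}
    (hij : i < j) (hj : j < l.length)
    (hpi : p (l[i]'(lt_trans hij hj))) (hpj : p l[j]) : 2 ≤ l.countP p := by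
  have hi : i < l.length := lt_trans hij hj
  have h1 : (l[i]'hi) ∈ l.take j := by
    have e : (l.take j)[i]'(by simp; omega) = l[i]'hi := List.getElem_take
    exact e ▸ List.getElem_mem _
  have h2 : l[j] ∈ l.drop j := by
    have e : (l.drop j)[0]'(by simp [Nat.sub_pos_of_lt hj]) = l[j] := by
      simp
    exact e ▸ List.getElem_mem _
  have c1 : 0 < (l.take j).countP p := List.countP_pos_iff.mpr ⟨_, h1, hpi⟩
  have c2 : 0 < (l.drop j).countP p := List.countP_pos_iff.mpr ⟨_, h2, hpj⟩
  have := List.countP_append (l₁ := l.take j) (l₂ := l.drop j) (p := p)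
  rw [← List.take_append_drop j l, this]
  omega

lemma countP_two_of_ne {l : List (List Int)} {p : List Int → Bool} {i j : Nat}
    (hij : i ≠ j) (hi : i < l.length) (hj : j < l.length)
    (hpi : p l[i]) (hpj : p l[j]) : 2 ≤ l.countP p := by
  rcases Nat.lt_or_ge i j with h | h
  · exact countP_two_aux h hj hpi hpj
  · exact countP_two_aux (Nat.lt_of_le_of_ne h (fun e => hij e.symm)) hi hpj hpi

lemma exists_two_of_countP {l : List (List Int)} {p : List Int → Bool}
    (h : 2 ≤ l.countP p) :
    ∃ (i j : Nat) (hi : i < l.length) (hj : j < l.length), i ≠ j ∧ p l[i] ∧ p l[j] := by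
  induction l with
  | nil => simp at h
  | cons a t ih =>
    by_cases pa : p a
    · have ht : 0 < t.countP p := by
        have h2 := h
        rw [List.countP_cons, if_pos pa] at h2
        omega
      rcases List.countP_pos_iff.mp ht with ⟨x, hx, hpx⟩
      rcases List.mem_iff_getElem.mp hx with ⟨k, hk, he⟩
      exact ⟨0, k + 1, by simp, by simpa using Nat.succ_lt_succ hk,
        by omega, by simpa using pa, by simpa [he] using hpx⟩
    · have h' : 2 ≤ t.countP p := by
        have h2 := h
        rw [List.countP_cons, if_neg pa] at h2
        omega
      rcases ih h' with ⟨i, j, hi, hj, hij, hpi, hpj⟩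
      exact ⟨i + 1, j + 1, Nat.succ_lt_succ hi, Nat.succ_lt_succ hj,
        by omega, by simpa using hpi, by simpa using hpj⟩

lemma altFold (cap : Int) (tubes : List (List Int)) (a b : Bool)
    (s r : PySem.Dict Int Int) :
    tubes.foldl (altStep cap) (a, b, s, r) =
      (a || tubes.any (fun t => !t.isEmpty),
       b || tubes.any (fun t => t.isEmpty && decide (0 < cap)),
       ((tubes.filter (fun t => !t.isEmpty)).map pyTop).foldl
         (fun d c => d.insert c (d.getD c 0 + 1)) s,
       ((tubes.filter (fun t => !t.isEmpty && decide ((t.length : Int) < cap))).map pyTop).foldl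
         (fun d c => d.insert c (d.getD c 0 + 1)) r) := by
  induction tubes generalizing a b s r with
  | nil => simp
  | cons t ts ih =>
    by_cases ht : t.isEmpty <;> by_cases hc : (0 : Int) < cap <;>
      by_cases hl : (t.length : Int) < cap <;>
      simp [altStep, ht, hc, hl, ih]

lemma keys_any_iff (tubes : List (List Int)) (cap : Int) :
    ((PySem.Dict.counter ((tubes.filter (fun t => !t.isEmpty && decide ((t.length : Int) < cap))).map pyTop)).keys.any
        (fun color => decide (2 ≤ (PySem.Dict.counter ((tubes.filter (fun t => !t.isEmpty)).map pyTop)).getD color 0))) = true ↔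
      ∃ t ∈ tubes, (!t.isEmpty && decide ((t.length : Int) < cap)) = true ∧
        2 ≤ tubes.countP (fun u => (pyTop u == pyTop t) && !u.isEmpty) := by
  rw [PySem.Dict.keys_counter]
  simp only [List.any_eq_true, decide_eq_true_eq]
  constructor
  · rintro ⟨c, hc, h2⟩
    rw [PySem.Dict.getD_counter] at h2
    have hc' : c ∈ (tubes.filter (fun t => !t.isEmpty && decide ((t.length : Int) < cap))).map pyTop := by
      simpa using (PySem.Set.mem_ofList _ _).mp hc
    rcases List.mem_map.mp hc' with ⟨t, ht, rfl⟩
    rcases List.mem_filter.mp ht with ⟨htm, htp⟩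
    refine ⟨t, htm, htp, ?_⟩
    rw [List.count_eq_countP, List.countP_map, List.countP_filter] at h2
    exact_mod_cast h2
  · rintro ⟨t, htm, htp, h2⟩
    refine ⟨pyTop t, ?_, ?_⟩
    · exact (PySem.Set.mem_ofList _ _).mpr (List.mem_map.mpr ⟨t, List.mem_filter.mpr ⟨htm, htp⟩, rfl⟩)
    · rw [PySem.Dict.getD_counter, List.count_eq_countP, List.countP_map, List.countP_filter]
      exact_mod_cast h2

lemma cond_iff_moveEx (tubes : List (List Int)) (cap : Int) :
    (((tubes.any (fun t => !t.isEmpty)) = true ∧ (tubes.any (fun t => t.isEmpty && decide (0 < cap))) = true)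
     ∨ (∃ t ∈ tubes, (!t.isEmpty && decide ((t.length : Int) < cap)) = true ∧
         2 ≤ tubes.countP (fun u => (pyTop u == pyTop t) && !u.isEmpty)))
    ↔ moveEx tubes cap := by
  constructor
  · rintro (⟨hne, her⟩ | ⟨t, htm, htp, h2⟩)
    · rcases List.any_eq_true.mp hne with ⟨s, hsm, hs⟩
      rcases List.any_eq_true.mp her with ⟨e, hem, he⟩
      simp only [Bool.and_eq_true, decide_eq_true_eq, List.isEmpty_iff, Bool.not_eq_true'] at hs he
      rw [List.isEmpty_eq_false_iff] at hs
      rcases List.mem_iff_getElem.mp hsm with ⟨i, hi, rfl⟩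
      rcases List.mem_iff_getElem.mp hem with ⟨j, hj, hje⟩
      refine ⟨i, j, hi, hj, ?_, hs, ?_, Or.inl (hje.trans he.1)⟩
      · intro h; subst h; rw [hje] at hs; exact hs he.1
      · rw [hje, he.1]; simpa using he.2
    · rcases List.mem_iff_getElem.mp htm with ⟨j, hj, rfl⟩
      simp only [Bool.and_eq_true, decide_eq_true_eq, Bool.not_eq_true', List.isEmpty_eq_false_iff] at htp
      rcases exists_two_of_countP h2 with ⟨i1, i2, h1, h2', hne12, hp1, hp2⟩
      simp only [Bool.and_eq_true, beq_iff_eq, Bool.not_eq_true', List.isEmpty_eq_false_iff] at hp1 hp2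
      by_cases hcase : i1 = j
      · refine ⟨i2, j, h2', hj, by omega, hp2.2, htp.2, Or.inr ?_⟩
        rw [getLast?_eq_some_pyTop _ htp.1, getLast?_eq_some_pyTop _ hp2.2, hp2.1]
      · refine ⟨i1, j, h1, hj, hcase, hp1.2, htp.2, Or.inr ?_⟩
        rw [getLast?_eq_some_pyTop _ htp.1, getLast?_eq_some_pyTop _ hp1.2, hp1.1]
  · rintro ⟨i, j, hi, hj, hij, hne, hlen, hdisj⟩
    rcases em (tubes[j] = []) with hjE | hjNE
    · refine Or.inl ⟨List.any_eq_true.mpr ⟨tubes[i], List.getElem_mem hi, by simpa using hne⟩,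
        List.any_eq_true.mpr ⟨tubes[j], List.getElem_mem hj, ?_⟩⟩
      simp only [Bool.and_eq_true, decide_eq_true_eq, List.isEmpty_iff]
      refine ⟨hjE, ?_⟩
      rw [hjE] at hlen; simpa using hlen
    · have hL : tubes[j].getLast? = tubes[i].getLast? := hdisj.resolve_left hjNE
      refine Or.inr ⟨tubes[j], List.getElem_mem hj, ?_, ?_⟩
      · simp only [Bool.and_eq_true, decide_eq_true_eq, Bool.not_eq_true', List.isEmpty_eq_false_iff]
        exact ⟨hjNE, hlen⟩
      · refine countP_two_of_ne hij hi hj ?_ ?_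
        · simp only [Bool.and_eq_true, beq_iff_eq, Bool.not_eq_true', List.isEmpty_eq_false_iff]
          exact ⟨pyTop_eq_of_getLast?_eq hne hjNE hL.symm, hne⟩
        · simp [hjNE]

lemma B_false_iff (tubes : List (List Int)) (cap : Int) :
    no_legal_moves_alt tubes cap = false ↔ moveEx tubes cap := by
  unfold no_legal_moves_alt
  rw [altFold]
  simp only [Bool.false_or, PySem.Dict.foldl_insert_getD_add_one_eq_counter]
  rw [← cond_iff_moveEx tubes cap]
  split_ifs with h1 h2
  · simp only [true_iff]
    rcases Bool.and_eq_true _ _ |>.mp h1 with ⟨hA, hB⟩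
    exact Or.inl ⟨hA, hB⟩
  · simp only [true_iff]
    exact Or.inr ((keys_any_iff tubes cap).mp h2)
  · simp only [false_iff]
    rintro (⟨hA, hB⟩ | hR)
    · exact h1 (by simp [hA, hB])
    · exact h2 ((keys_any_iff tubes cap).mpr hR)

-- ===== VERDICT (by name: the statement is the Claim_ definition above) =====
theorem no_legal_moves_spec : Claim_equal_no_legal_moves := by
  intro tubes cap _
  unfold Spec_no_legal_moves
  rcases hB : no_legal_moves_alt tubes cap with _ | _
  · exact (A_false_iff tubes cap).mpr ((B_false_iff tubes cap).mp hB)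
  · rcases hA : no_legal_moves tubes cap with _ | _
    · exact absurd ((B_false_iff tubes cap).mpr ((A_false_iff tubes cap).mp hA)) (by simp [hB])
    · rfl
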